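-- pv_equiv track=rewrite | github.com/yatao91/learning_road | leetcode/736_Parse_Lisp_Expression.py | parse
-- ===== SOURCE A (Python) =====
-- def parse(expression):
--     bal = 0
--     buf = []
--     for token in expression.split():
--         bal += token.count('(') - token.count(')')
--         buf.append(token)
--         if bal == 0:
--             yield " ".join(buf)
--             buf = []
--     if buf:
--         yield " ".join(buf)
-- ===== SOURCE B (Python) =====
-- def parse(expression):
--     tokens = expression.split()
--     boundaries = []
--     bal = 0
--     for i, t in enumerate(tokens):
--         bal += t.count('(') - t.count(')')
--         if bal == 0:
--             boundaries.append(i + 1)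
--     if tokens and (not boundaries or boundaries[-1] != len(tokens)):
--         boundaries.append(len(tokens))
--     start = 0
--     for b in boundaries:
--         yield " ".join(tokens[start:b])
--         start = b
-- ===== Notes on version B (the rewrite author's own statement) =====
-- stated objective: alternative
-- what changed: Replaces A's single streaming scan with a mutable buffer by a two-phase decomposition: one pass records the boundary indices where the parenthesis balance returns to zero (plus a final boundary for a never-rebalanced tail), and a second pass emits each group by slicing the token list between consecutive boundaries.
import Mathlib
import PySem

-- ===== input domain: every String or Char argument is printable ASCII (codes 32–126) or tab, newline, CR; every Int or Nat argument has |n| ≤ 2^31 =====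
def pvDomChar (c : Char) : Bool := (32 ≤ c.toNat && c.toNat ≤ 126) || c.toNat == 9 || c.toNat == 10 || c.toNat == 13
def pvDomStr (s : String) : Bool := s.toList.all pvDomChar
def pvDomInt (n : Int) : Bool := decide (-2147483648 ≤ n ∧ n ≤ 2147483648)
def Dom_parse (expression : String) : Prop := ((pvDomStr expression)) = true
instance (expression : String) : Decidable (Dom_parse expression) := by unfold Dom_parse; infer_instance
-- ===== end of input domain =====

-- B groups the tokens in two phases (record balance-zero boundary indices, then slice between
-- consecutive boundaries) instead of A's single streaming scan with a mutable buffer; same cost.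

-- ===== PORT A =====
-- net parenthesis balance contributed by one token: token.count('(') - token.count(')')
def pvCnt (t : String) : Int := (PySem.Str.count t "(" : Int) - (PySem.Str.count t ")" : Int)

-- A's for-loop over the tokens with state (bal, buf), yielding joined groups;
-- the trailing 'if buf: yield' is the [] case.
def parseLoopA : Int → List String → List String → List String
  | _, buf, [] => if buf = [] then [] else [PySem.Str.join " " buf]
  | bal, buf, t :: ts =>
    let bal' := bal + pvCnt t
    let buf' := buf ++ [t]
    if bal' = 0 then PySem.Str.join " " buf' :: parseLoopA bal' [] ts
    else parseLoopA bal' buf' ts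

def parse (expression : String) : List String :=
  parseLoopA 0 [] (PySem.Str.split₀ expression)

-- ===== PORT B =====
-- first pass: indices i+1 (into the token list) where the running balance returns to zero
def pvBnds : Int → Nat → List String → List Nat
  | _, _, [] => []
  | bal, i, t :: ts =>
    let bal' := bal + pvCnt t
    if bal' = 0 then (i + 1) :: pvBnds bal' (i + 1) ts else pvBnds bal' (i + 1) ts

-- second pass: yield " ".join(tokens[start:b]) for each boundary b, advancing start
def pvEmit (tokens : List String) : Nat → List Nat → List String
  | _, [] => []
  | start, b :: bs =>
    PySem.Str.join " " (PySem.List.slice tokens (some (start : Int)) (some (b : Int)))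
      :: pvEmit tokens b bs

def parse_alt (expression : String) : List String :=
  let tokens := PySem.Str.split₀ expression
  let bs := pvBnds 0 0 tokens
  let bs' := if tokens ≠ [] ∧ (bs = [] ∨ bs.getLast? ≠ some tokens.length)
             then bs ++ [tokens.length] else bs
  pvEmit tokens 0 bs'

-- ===== PRECONDITION & SPEC =====
def Spec_parse (expression : String) (out : List String) : Prop := out = parse_alt expression
instance (expression : String) (out : List String) : Decidable (Spec_parse expression out) := by unfold Spec_parse; infer_instance

-- ===== CLAIM (what is proved, stated in full; the proofs are below) =====
def Claim_equal_parse : Prop := ∀ (expression : String), Dom_parse expression → Spec_parse expression (parse expression)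

-- ===== LEMMAS AND PROOFS =====

-- every boundary recorded from position i lies strictly above i and within i + remaining length
theorem pvBnds_mem_bounds : ∀ (ts : List String) (bal : Int) (i b : Nat),
    b ∈ pvBnds bal i ts → i < b ∧ b ≤ i + ts.length := by
  intro ts
  induction ts with
  | nil => intro bal i b h; simp [pvBnds] at h
  | cons t ts ih =>
    intro bal i b h
    simp only [pvBnds] at h
    split at h
    · rcases List.mem_cons.mp h with h | h
      · simp only [List.length_cons]; omega
      · have := ih _ _ _ h; simp only [List.length_cons]; omega
    · have := ih _ _ _ h; simp only [List.length_cons]; omega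

-- slice of one more element, when tokens[i] is known
theorem slice_snoc (tokens : List String) (start i : Nat) (t : String)
    (hst : start ≤ i) (hi : tokens[i]? = some t) :
    (List.drop start tokens).take (i + 1 - start)
      = (List.drop start tokens).take (i - start) ++ [t] := by
  have : i + 1 - start = (i - start) + 1 := by omega
  rw [this, List.take_add_one]
  have : (List.drop start tokens)[i - start]? = some t := by
    rw [List.getElem?_drop]
    have : start + (i - start) = i := by omega
    rw [this, hi]
  simp [this]

-- main invariant: emitting from the boundaries (plus the fix-up tail for a pending group)
-- reproduces A's streaming loop, where A's buffer is the slice tokens[start:i]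
theorem pvEmit_eq_loopA (tokens : List String) :
    ∀ (ts : List String) (i : Nat) (bal : Int) (start : Nat),
    tokens.drop i = ts → start ≤ i →
    pvEmit tokens start
        (pvBnds bal i ts
          ++ (if (pvBnds bal i ts).getLast?.getD start < tokens.length
              then [tokens.length] else []))
      = parseLoopA bal ((tokens.drop start).take (i - start)) ts := by
  intro ts
  induction ts with
  | nil =>
    intro i bal start hdrop hst
    have hlen : tokens.length ≤ i := by
      have := List.drop_eq_nil_iff.mp hdrop; omega
    simp only [pvBnds, List.nil_append, List.getLast?_nil, Option.getD_none]
    by_cases h : start < tokens.length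
    · simp only [if_pos h, pvEmit, PySem.List.slice_natCast]
      have h1 : (tokens.drop start).take (tokens.length - start) = tokens.drop start := by
        apply List.take_of_length_le; simp
      have h2 : (tokens.drop start).take (i - start) = tokens.drop start := by
        apply List.take_of_length_le; simp; omega
      have hne : tokens.drop start ≠ [] := by
        intro hc; have := List.drop_eq_nil_iff.mp hc; omega
      simp [parseLoopA, h1, h2, hne]
    · simp only [if_neg h, pvEmit]
      have h2 : (tokens.drop start).take (i - start) = [] := by
        have : tokens.drop start = [] := List.drop_eq_nil_iff.mpr (by omega)
        simp [this]
      simp [parseLoopA, h2]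
  | cons t ts ih =>
    intro i bal start hdrop hst
    have hi : i < tokens.length := by
      by_contra hc
      have : tokens.drop i = [] := List.drop_eq_nil_iff.mpr (by omega)
      rw [this] at hdrop; simp at hdrop
    have hget : tokens[i]? = some t := by
      have : (tokens.drop i)[0]? = some t := by rw [hdrop]; rfl
      rwa [List.getElem?_drop, Nat.add_zero] at this
    have hdrop' : tokens.drop (i + 1) = ts := by
      have : tokens.drop (i + 1) = (tokens.drop i).drop 1 := by
        rw [List.drop_drop]
      rw [this, hdrop]; rfl
    simp only [pvBnds, parseLoopA]
    by_cases hz : bal + pvCnt t = 0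
    · simp only [if_pos hz]
      have hlast : ((i + 1) :: pvBnds (bal + pvCnt t) (i + 1) ts).getLast?.getD start
          = (pvBnds (bal + pvCnt t) (i + 1) ts).getLast?.getD (i + 1) := by
        cases hb : pvBnds (bal + pvCnt t) (i + 1) ts with
        | nil => simp
        | cons b bs =>
          cases hy : (b :: bs).getLast? with
          | none => simp at hy
          | some y => simp [hy]
      rw [List.cons_append, hlast, pvEmit]
      rw [ih (i + 1) (bal + pvCnt t) (i + 1) hdrop' (le_refl _)]
      have hbuf : PySem.List.slice tokens (some (start : Int)) (some ((i + 1 : Nat) : Int))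
          = (tokens.drop start).take (i - start) ++ [t] := by
        rw [PySem.List.slice_natCast, slice_snoc tokens start i t hst hget]
      push_cast at hbuf ⊢
      rw [hbuf]
      simp
    · simp only [if_neg hz]
      rw [ih (i + 1) (bal + pvCnt t) start hdrop' (by omega)]
      rw [slice_snoc tokens start i t hst hget]

-- the Python fix-up condition coincides with the invariant's pending-group condition
theorem fixup_eq (tokens : List String) :
    (if tokens ≠ [] ∧ (pvBnds 0 0 tokens = [] ∨ (pvBnds 0 0 tokens).getLast? ≠ some tokens.length)
     then pvBnds 0 0 tokens ++ [tokens.length] else pvBnds 0 0 tokens)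
    = pvBnds 0 0 tokens
      ++ (if (pvBnds 0 0 tokens).getLast?.getD 0 < tokens.length then [tokens.length] else []) := by
  cases hb : (pvBnds 0 0 tokens).getLast? with
  | none =>
    have hnil : pvBnds 0 0 tokens = [] := List.getLast?_eq_none_iff.mp hb
    rw [hnil]
    by_cases h : tokens = []
    · subst h; simp
    · have : 0 < tokens.length := List.length_pos_iff.mpr h
      simp [h, this]
  | some b =>
    have hmem : b ∈ pvBnds 0 0 tokens := List.mem_of_getLast? hb
    have hbd := pvBnds_mem_bounds tokens 0 0 b hmem
    have hne : pvBnds 0 0 tokens ≠ [] := by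
      intro hc; rw [hc] at hb; simp at hb
    have htne : tokens ≠ [] := by
      intro hc; subst hc; simp at hbd; omega
    simp only [Option.getD_some, ne_eq, htne, not_false_eq_true, hne, false_or, true_and]
    by_cases h : b = tokens.length
    · subst h; simp
    · have : b < tokens.length := by omega
      simp [h, this]

-- ===== VERDICT (by name: the statement is the Claim_ definition above) =====
theorem parse_spec : Claim_equal_parse := by
  intro expression _
  unfold Spec_parse parse parse_alt
  show parseLoopA 0 [] (PySem.Str.split₀ expression)
    = pvEmit (PySem.Str.split₀ expression) 0
        (if PySem.Str.split₀ expression ≠ [] ∧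
            (pvBnds 0 0 (PySem.Str.split₀ expression) = [] ∨
             (pvBnds 0 0 (PySem.Str.split₀ expression)).getLast?
               ≠ some (PySem.Str.split₀ expression).length)
         then pvBnds 0 0 (PySem.Str.split₀ expression) ++ [(PySem.Str.split₀ expression).length]
         else pvBnds 0 0 (PySem.Str.split₀ expression))
  rw [fixup_eq (PySem.Str.split₀ expression)]
  rw [pvEmit_eq_loopA (PySem.Str.split₀ expression) (PySem.Str.split₀ expression) 0 0 0
      (by simp) (le_refl _)]
  simp
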